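-- pv_equiv track=rewrite | github.com/HeartBioPortal/DataHub | src/datahub/adapters/dbvar_structural_variant.py | phenotype_matches_terms
-- ===== SOURCE A (Python) =====
-- from typing import Any, Callable, Iterable, Iterator, Mapping
--
-- MISSING_TOKENS = {"", "nan", "none", "null", "na", "n/a"}
--
-- def _clean_text(value: Any) -> str:
--     if value is None:
--         return ""
--     text = str(value).strip()
--     if text.lower() in MISSING_TOKENS:
--         return ""
--     return text
--
-- def phenotype_matches_terms(phenotypes: Iterable[str], phenotype_terms: Iterable[str]) -> bool:
--     normalized_terms = [term.lower() for term in phenotype_terms if _clean_text(term)]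
--     if not normalized_terms:
--         return True
--     for phenotype in phenotypes:
--         lowered = phenotype.lower()
--         if any(term in lowered for term in normalized_terms):
--             return True
--     return False
-- ===== SOURCE B (Python) =====
-- MISSING_TOKENS = {"", "nan", "none", "null", "na", "n/a"}
--
-- def phenotype_matches_terms(phenotypes, phenotype_terms):
--     # substring-enumeration search: build a hash set of the cleaned lowered
--     # terms and the set of their lengths, then slide a window of each term
--     # length over each lowered phenotype and test the window against the set
--     # (set lookup instead of scanning the term list per phenotype).
--     term_set = {t.lower() for t in phenotype_terms
--                 if t.strip().lower() not in MISSING_TOKENS}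
--     if not term_set:
--         return True
--     lengths = sorted({len(t) for t in term_set})
--     for phenotype in phenotypes:
--         low = phenotype.lower()
--         for L in lengths:
--             for i in range(len(low) - L + 1):
--                 if low[i:i+L] in term_set:
--                     return True
--     return False
-- ===== Notes on version B (the rewrite author's own statement) =====
-- stated objective: alternative
-- what changed: B replaces A's per-term substring scans with a window-enumeration search: it builds a hash set of the cleaned lowered terms and the set of their lengths, then slides windows of those lengths over each lowered phenotype and answers by set membership, so no term is ever scanned through a phenotype.
import Mathlib
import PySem

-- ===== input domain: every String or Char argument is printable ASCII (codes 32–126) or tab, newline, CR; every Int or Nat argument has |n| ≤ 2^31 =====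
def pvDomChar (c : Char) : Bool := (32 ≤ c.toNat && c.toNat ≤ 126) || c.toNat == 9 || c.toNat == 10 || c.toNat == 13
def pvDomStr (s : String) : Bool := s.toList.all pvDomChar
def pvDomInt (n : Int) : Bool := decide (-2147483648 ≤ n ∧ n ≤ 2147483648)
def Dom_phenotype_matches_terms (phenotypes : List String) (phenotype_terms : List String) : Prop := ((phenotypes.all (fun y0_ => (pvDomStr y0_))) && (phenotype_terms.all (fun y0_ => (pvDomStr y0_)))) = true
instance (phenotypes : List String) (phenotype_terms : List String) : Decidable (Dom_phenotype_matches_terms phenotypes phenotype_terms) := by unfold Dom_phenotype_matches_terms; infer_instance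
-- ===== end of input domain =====

-- B replaces A's per-term substring scans by a window-enumeration search over a hash
-- set of the cleaned lowered terms (windows of each distinct term length); same result.

-- ===== PORT A =====
def missingTokens : List String := ["", "nan", "none", "null", "na", "n/a"]

-- _clean_text for a str argument (value is never None here)
def cleanText (value : String) : String :=
  let text := PySem.Str.strip value
  if (PySem.Str.lower text) ∈ missingTokens then "" else text

-- the 'for phenotype in phenotypes: … return True / … return False' loop
def loopA (normalized_terms : List String) : List String → Bool
  | [] => false
  | phenotype :: rest =>
    let lowered := PySem.Str.lower phenotype
    if normalized_terms.any (fun term => PySem.Str.isIn term lowered) then true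
    else loopA normalized_terms rest

def phenotype_matches_terms (phenotypes : List String) (phenotype_terms : List String) : Bool :=
  let normalized_terms :=
    (phenotype_terms.filter (fun term => cleanText term ≠ "")).map PySem.Str.lower
  if normalized_terms = [] then true
  else loopA normalized_terms phenotypes

-- ===== PORT B =====
def phenotype_matches_terms_alt (phenotypes : List String) (phenotype_terms : List String) : Bool :=
  let term_set : PySem.Set String :=
    PySem.Set.ofList
      ((phenotype_terms.filter
          (fun t => PySem.Str.lower (PySem.Str.strip t) ∉ missingTokens)).map PySem.Str.lower)
  if term_set = [] then true
  else
    let lengths : List Int :=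
      PySem.List.sorted (PySem.Set.ofList (term_set.map (fun t => (PySem.Str.len t : Int))))
        (fun x => x) false
    phenotypes.any (fun phenotype =>
      let low := PySem.Str.lower phenotype
      lengths.any (fun L =>
        (PySem.List.pyRange 0 ((PySem.Str.len low : Int) - L + 1) 1).any (fun i =>
          PySem.Str.slice low (some i) (some (i + L)) ∈ term_set)))

-- ===== PRECONDITION & SPEC =====
def Spec_phenotype_matches_terms (phenotypes : List String) (phenotype_terms : List String) (out : Bool) : Prop := out = phenotype_matches_terms_alt phenotypes phenotype_terms
instance (phenotypes : List String) (phenotype_terms : List String) (out : Bool) : Decidable (Spec_phenotype_matches_terms phenotypes phenotype_terms out) := by unfold Spec_phenotype_matches_terms; infer_instance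

-- ===== CLAIM (what is proved, stated in full; the proofs are below) =====
def Claim_equal_phenotype_matches_terms : Prop := ∀ (phenotypes : List String) (phenotype_terms : List String), Dom_phenotype_matches_terms phenotypes phenotype_terms → Spec_phenotype_matches_terms phenotypes phenotype_terms (phenotype_matches_terms phenotypes phenotype_terms)

-- ===== LEMMAS AND PROOFS =====

-- the two filters keep exactly the same terms
theorem filter_cond_eq (t : String) :
    (decide (cleanText t ≠ "")) =
    (decide (PySem.Str.lower (PySem.Str.strip t) ∉ missingTokens)) := by
  unfold cleanText
  by_cases h : PySem.Str.lower (PySem.Str.strip t) ∈ missingTokens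
  · simp [h]
  · have hne : PySem.Str.strip t ≠ "" := by
      intro h0
      apply h
      rw [h0]
      decide
    simp [h, hne]

theorem loopA_eq_any (nt : List String) (ps : List String) :
    loopA nt ps = ps.any (fun p => nt.any (fun t => PySem.Str.isIn t (PySem.Str.lower p))) := by
  induction ps with
  | nil => rfl
  | cons p rest ih =>
    rw [loopA, List.any_cons, ← ih]
    cases h : nt.any (fun term => PySem.Str.isIn term (PySem.Str.lower p)) with
    | false => rw [if_neg (by simp), Bool.false_or]
    | true => rw [if_pos (by simp), Bool.true_or]

-- per-phenotype core: scanning the terms through `low` finds a match exactly when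
-- some window of a term length in `low` is a member of the term set
theorem window_lemma (ts : PySem.Set String) (low : String) :
    (ts.any (fun t => PySem.Str.isIn t low)) =
    ((PySem.List.sorted (PySem.Set.ofList (ts.map (fun t => (PySem.Str.len t : Int))))
        (fun x => x) false).any (fun L =>
      (PySem.List.pyRange 0 ((PySem.Str.len low : Int) - L + 1) 1).any (fun i =>
        PySem.Str.slice low (some i) (some (i + L)) ∈ ts))) := by
  apply Bool.eq_iff_iff.2
  simp only [List.any_eq_true, PySem.List.mem_sorted, PySem.Set.mem_ofList,
    List.mem_map, PySem.List.mem_pyRange_one, PySem.Str.len_eq]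
  constructor
  · rintro ⟨t, ht, hin⟩
    rw [PySem.Str.isIn_iff_infix] at hin
    obtain ⟨pre, suf, hd⟩ := hin
    refine ⟨(t.length : Int), ⟨t, ht, rfl⟩, (pre.length : Int), ⟨by positivity, ?_⟩, ?_⟩
    · have hlen : low.toList.length = pre.length + t.toList.length + suf.length := by
        rw [← hd]; simp; omega
      have hteq : t.toList.length = t.length := String.length_toList
      omega
    · have hslice : PySem.Str.slice low (some (pre.length : Int)) (some ((pre.length : Int) + (t.length : Int))) = t := by
        apply String.toList_inj.mp
        have := PySem.Str.toList_slice low (some (pre.length : Int)) (some ((pre.length : Int) + (t.length : Int)))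
        rw [this]
        simp only [PySem.Chars.slice_eq_listSlice]
        have hL : (t.length : Int) = ((t.toList.length : Nat) : Int) := by
          rw [String.length_toList]
        rw [hL, PySem.List.slice_natCast_add]
        rw [← hd]
        simp
      rw [hslice]; simpa using ht
  · rintro ⟨L, ⟨t, ht, hLt⟩, i, ⟨hi0, hiub⟩, hmem⟩
    simp only [decide_eq_true_eq] at hmem
    refine ⟨_, hmem, ?_⟩
    rw [PySem.Str.isIn_iff_infix]
    have h1 := PySem.Str.toList_slice low (some i) (some (i + L))
    rw [h1]
    simp only [PySem.Chars.slice_eq_listSlice]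
    have hL0 : (0:Int) ≤ L := by rw [← hLt]; positivity
    rw [PySem.List.slice_toNat _ hi0 (by omega)]
    exact ((low.toList.drop i.toNat).take_prefix _).isInfix.trans (low.toList.drop_suffix i.toNat).isInfix

-- any over the set keeps exactly the any over the underlying list (membership agrees)
theorem any_ofList (nt : List String) (f : String → Bool) :
    nt.any f = (PySem.Set.ofList nt).any f := by
  apply Bool.eq_iff_iff.2
  simp only [List.any_eq_true, PySem.Set.mem_ofList]

-- ===== VERDICT (by name: the statement is the Claim_ definition above) =====
theorem phenotype_matches_terms_spec : Claim_equal_phenotype_matches_terms := by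
  intro ps ts _
  unfold Spec_phenotype_matches_terms phenotype_matches_terms phenotype_matches_terms_alt
  have hfilter :
      ts.filter (fun term => cleanText term ≠ "") =
      ts.filter (fun t => PySem.Str.lower (PySem.Str.strip t) ∉ missingTokens) := by
    apply List.filter_congr
    intro t _
    exact filter_cond_eq t
  rw [← hfilter]
  set nt := (ts.filter (fun term => cleanText term ≠ "")).map PySem.Str.lower with hnt
  by_cases h : nt = []
  · simp [h, PySem.Set.ofList]
  · have hS : PySem.Set.ofList nt ≠ [] := by
      obtain ⟨x, xs, hx⟩ := List.exists_cons_of_ne_nil h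
      intro hnil
      have : x ∈ PySem.Set.ofList nt := (PySem.Set.mem_ofList nt x).2 (by rw [hx]; exact List.mem_cons_self ..)
      rw [hnil] at this
      exact List.not_mem_nil this
    rw [if_neg h, if_neg hS, loopA_eq_any]
    apply List.any_congr rfl
    intro p
    rw [any_ofList nt (fun t => PySem.Str.isIn t (PySem.Str.lower p))]
    exact window_lemma (PySem.Set.ofList nt) (PySem.Str.lower p)
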